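-- pv_equiv track=rewrite | github.com/OzcarC/hackdavis | backend/app/ai/generator.py | pick_event_types
-- ===== SOURCE A (Python) =====
-- def pick_event_types(venue: dict, popular_tags: list[str], n: int) -> list[str]:
--     """Pick up to n distinct event_types from this venue, prioritized by user popularity.
--
--     Falls back to the venue's natural order if there's no overlap with popular tags.
--     """
--     venue_types = venue.get("event_types") or []
--     if not venue_types:
--         return []
--
--     # Tags from venue that are also popular, in popularity order
--     overlapping = [t for t in popular_tags if t in venue_types]
--     rest = [t for t in venue_types if t not in overlapping]
--     ordered = overlapping + rest
--     # De-dupe, preserve order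
--     seen = set()
--     result = []
--     for t in ordered:
--         if t not in seen:
--             seen.add(t)
--             result.append(t)
--         if len(result) >= n:
--             break
--     return result
-- ===== SOURCE B (Python) =====
-- def pick_event_types(venue: dict, popular_tags: list[str], n: int) -> list[str]:
--     """Pick up to n distinct event_types, popular ones first (in popularity order),
--     the rest in venue order; n <= 0 picks nothing."""
--     venue_types = venue.get("event_types") or []
--     if not venue_types or n <= 0:
--         return []
--     rank = {}
--     for i, t in enumerate(popular_tags):
--         rank.setdefault(t, i)
--     missing = len(popular_tags)
--     ordered = sorted(dict.fromkeys(venue_types), key=lambda t: rank.get(t, missing))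
--     return ordered[:n]
-- ===== Notes on version B (the rewrite author's own statement) =====
-- stated objective: alternative
-- what changed: Replaces A's overlap-filter + rest-filter concatenation followed by a seen-set dedupe loop with an early break by a rank-and-sort algorithm: build a first-occurrence popularity-rank dict via setdefault over enumerate(popular_tags), dedupe the venue types once with dict.fromkeys, stably sort them by rank (absent tags rank last, keeping venue order), and slice [:n].
-- intended difference: On inputs with a nonempty event_types list and n <= 0, A returns a one-element list (its break check runs only after the first append), while B returns [], the intended 'pick up to n' behaviour. — e.g. on pick_event_types([("event_types", ["music", "art"])], ["art"], 0): A returns ["art"], B returns []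
import Mathlib
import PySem

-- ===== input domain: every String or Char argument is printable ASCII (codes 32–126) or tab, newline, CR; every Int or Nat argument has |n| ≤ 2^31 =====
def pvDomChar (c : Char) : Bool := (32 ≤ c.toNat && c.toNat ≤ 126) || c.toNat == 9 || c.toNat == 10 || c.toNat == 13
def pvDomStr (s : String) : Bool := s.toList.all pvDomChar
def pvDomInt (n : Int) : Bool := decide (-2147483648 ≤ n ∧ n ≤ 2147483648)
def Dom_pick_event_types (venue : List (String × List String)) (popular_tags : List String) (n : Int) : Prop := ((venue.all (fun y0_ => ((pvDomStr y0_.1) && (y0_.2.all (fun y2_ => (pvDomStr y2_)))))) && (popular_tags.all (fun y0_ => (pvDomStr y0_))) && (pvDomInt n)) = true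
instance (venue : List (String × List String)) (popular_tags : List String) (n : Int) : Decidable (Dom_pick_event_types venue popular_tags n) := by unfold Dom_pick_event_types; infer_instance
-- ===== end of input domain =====

-- B is a rank-and-sort reimplementation: a first-occurrence popularity-rank dict (setdefault over
-- enumerate) and ONE stable sort of the deduped venue types by that rank, then slice [:n]; on n ≤ 0
-- with a nonempty list it returns [] where A returns one element (stated as D_ below).

-- ===== PORT A =====
-- the dedupe loop with early break: for t in ordered: if t not in seen: add/append; if len(result) >= n: break
def pickLoop (n : Int) : List String → PySem.Set String → List String → List String
  | [], _seen, result => result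
  | t :: ts, seen, result =>
    let st := if !(seen.contains t) then (PySem.Set.add seen t, result ++ [t]) else (seen, result)
    if (st.2.length : Int) ≥ n then st.2 else pickLoop n ts st.1 st.2

def pick_event_types (venue : List (String × List String)) (popular_tags : List String) (n : Int) : List String :=
  let venue_types := ((PySem.Dict.mk venue).get? "event_types").getD []
  if venue_types = [] then []
  else
    let overlapping := popular_tags.filter (fun t => venue_types.contains t)
    let rest := venue_types.filter (fun t => !(overlapping.contains t))
    let ordered := overlapping ++ rest
    pickLoop n ordered PySem.Set.empty []

-- ===== PORT B =====
-- rank = {}; for i, t in enumerate(popular_tags): rank.setdefault(t, i)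
-- ordered = sorted(dict.fromkeys(venue_types), key=lambda t: rank.get(t, missing)); return ordered[:n]
def pick_event_types_alt (venue : List (String × List String)) (popular_tags : List String) (n : Int) : List String :=
  let venue_types := ((PySem.Dict.mk venue).get? "event_types").getD []
  if venue_types = [] ∨ n ≤ 0 then []
  else
    let rank : PySem.Dict String Int :=
      (PySem.List.enumerate popular_tags).foldl (fun d p => d.setdefault p.2 p.1) PySem.Dict.empty
    let missing : Int := popular_tags.length
    let ordered := PySem.List.sorted (PySem.List.dedup venue_types) (fun t => rank.getD t missing) false
    PySem.List.slice ordered none (some n)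

-- ===== PRECONDITION & SPEC =====
-- On inputs with a nonempty event_types list and n ≤ 0, A returns a one-element list (its
-- break check runs only after the first append), while B returns [], the intended
-- 'pick up to n' behaviour.
def D_pick_event_types (venue : List (String × List String)) (popular_tags : List String) (n : Int) : Prop :=
  (((venue.find? (fun q => q.1 == "event_types")).map (fun q => q.2)).getD []) ≠ [] ∧ n ≤ 0
instance (venue : List (String × List String)) (popular_tags : List String) (n : Int) : Decidable (D_pick_event_types venue popular_tags n) := by unfold D_pick_event_types; infer_instance

def Spec_pick_event_types (venue : List (String × List String)) (popular_tags : List String) (n : Int) (out : List String) : Prop := ¬ D_pick_event_types venue popular_tags n → out = pick_event_types_alt venue popular_tags n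
instance (venue : List (String × List String)) (popular_tags : List String) (n : Int) (out : List String) : Decidable (Spec_pick_event_types venue popular_tags n out) := by unfold Spec_pick_event_types; infer_instance

def pvDiffWitness_pick_event_types : (List (String × List String)) × List String × Int :=
  ([("event_types", ["music", "art"])], ["art"], 0)
def pvDiffWitnessOut_pick_event_types : (List String) × (List String) := (["art"], [])

-- ===== CLAIM (what is proved, stated in full; the proofs are below) =====
def Claim_unchanged_pick_event_types : Prop := ∀ (venue : List (String × List String)) (popular_tags : List String) (n : Int), Dom_pick_event_types venue popular_tags n → Spec_pick_event_types venue popular_tags n (pick_event_types venue popular_tags n)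
def Claim_changed_pick_event_types : Prop := Dom_pick_event_types (pvDiffWitness_pick_event_types.1) (pvDiffWitness_pick_event_types.2.1) (pvDiffWitness_pick_event_types.2.2) ∧ D_pick_event_types (pvDiffWitness_pick_event_types.1) (pvDiffWitness_pick_event_types.2.1) (pvDiffWitness_pick_event_types.2.2) ∧ pick_event_types (pvDiffWitness_pick_event_types.1) (pvDiffWitness_pick_event_types.2.1) (pvDiffWitness_pick_event_types.2.2) = pvDiffWitnessOut_pick_event_types.1 ∧ pick_event_types_alt (pvDiffWitness_pick_event_types.1) (pvDiffWitness_pick_event_types.2.1) (pvDiffWitness_pick_event_types.2.2) = pvDiffWitnessOut_pick_event_types.2 ∧ pvDiffWitnessOut_pick_event_types.1 ≠ pvDiffWitnessOut_pick_event_types.2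
def Claim_exact_pick_event_types : Prop := ∀ (venue : List (String × List String)) (popular_tags : List String) (n : Int), Dom_pick_event_types venue popular_tags n → D_pick_event_types venue popular_tags n → pick_event_types venue popular_tags n ≠ pick_event_types_alt venue popular_tags n

-- ===== LEMMAS AND PROOFS =====

-- first occurrences of elements of l not already in acc, in order
def dfrom (acc : List String) : List String → List String
  | [] => []
  | x :: xs => if acc.contains x then dfrom acc xs else x :: dfrom (acc ++ [x]) xs

theorem mem_dfrom_iff (l : List String) : ∀ (acc : List String) (y : String),
    y ∈ dfrom acc l ↔ y ∈ l ∧ y ∉ acc := by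
  induction l with
  | nil => intro acc y; simp [dfrom]
  | cons x xs ih =>
    intro acc y
    by_cases h : acc.contains x = true
    · simp only [dfrom, h, if_pos]
      rw [ih]
      have hx : x ∈ acc := by simpa using h
      constructor
      · rintro ⟨hy, hny⟩; exact ⟨List.mem_cons_of_mem _ hy, hny⟩
      · rintro ⟨hy, hny⟩
        rcases List.mem_cons.mp hy with rfl | hy
        · exact absurd hx hny
        · exact ⟨hy, hny⟩
    · simp only [dfrom, h, if_neg, Bool.not_eq_true]
      have hx : x ∉ acc := by simpa using h
      constructor
      · intro hmem
        rcases List.mem_cons.mp hmem with rfl | hmem'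
        · exact ⟨List.mem_cons_self .., hx⟩
        · obtain ⟨hy, hny⟩ := (ih (acc ++ [x]) y).mp hmem'
          exact ⟨List.mem_cons_of_mem _ hy, fun hc => hny (List.mem_append_left _ hc)⟩
      · rintro ⟨hy, hny⟩
        by_cases hyx : y = x
        · exact hyx ▸ List.mem_cons_self ..
        · rcases List.mem_cons.mp hy with rfl | hy'
          · exact absurd rfl hyx
          · refine List.mem_cons_of_mem _ ((ih (acc ++ [x]) y).mpr ⟨hy', fun hc => ?_⟩)
            rcases List.mem_append.mp hc with h1 | h2
            · exact hny h1
            · exact hyx (by simpa using h2)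

theorem dfrom_agree (l : List String) : ∀ (acc acc' : List String),
    (∀ y ∈ l, (y ∈ acc ↔ y ∈ acc')) → dfrom acc l = dfrom acc' l := by
  induction l with
  | nil => intro acc acc' _; rfl
  | cons x xs ih =>
    intro acc acc' h
    have hx : (x ∈ acc ↔ x ∈ acc') := h x (List.mem_cons_self ..)
    have hc : acc.contains x = acc'.contains x := by
      by_cases hm : x ∈ acc
      · simp [hm, hx.mp hm]
      · have hm' : x ∉ acc' := fun hc => hm (hx.mpr hc)
        simp [hm, hm']
    by_cases hb : acc.contains x = true
    · simp only [dfrom, hb, hc ▸ hb, if_pos]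
      exact ih acc acc' (fun y hy => h y (List.mem_cons_of_mem _ hy))
    · simp only [dfrom, hb, hc ▸ hb, if_neg, Bool.not_eq_true]
      refine congrArg (x :: ·) (ih _ _ ?_)
      intro y hy
      simp only [List.mem_append, List.mem_singleton]
      exact or_congr (h y (List.mem_cons_of_mem _ hy)) Iff.rfl

theorem foldl_add_eq_dfrom (l : List String) : ∀ acc,
    List.foldl PySem.Set.add acc l = acc ++ dfrom acc l := by
  induction l with
  | nil => intro acc; simp [dfrom]
  | cons x xs ih =>
    intro acc
    by_cases h : x ∈ acc
    · have hc : acc.contains x = true := by simpa using h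
      simp [dfrom, h, hc, List.foldl_cons, PySem.Set.add, ih]
    · have hc : acc.contains x = false := by simpa using h
      simp [dfrom, h, hc, List.foldl_cons, PySem.Set.add, ih]

theorem dedup_eq_dfrom (l : List String) : PySem.List.dedup l = dfrom [] l := by
  have := foldl_add_eq_dfrom l []
  simpa [PySem.List.dedup, PySem.Set.ofList, PySem.Set.empty] using this

theorem dfrom_append (a : List String) : ∀ (b acc : List String),
    dfrom acc (a ++ b) = dfrom acc a ++ dfrom (acc ++ dfrom acc a) b := by
  induction a with
  | nil => intro b acc; simp [dfrom]
  | cons x xs ih =>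
    intro b acc
    by_cases h : x ∈ acc
    · have hc : acc.contains x = true := by simpa using h
      simp [dfrom, h, hc, ih]
    · have hc : acc.contains x = false := by simpa using h
      simp only [List.cons_append, dfrom, hc, Bool.false_eq_true, if_false]
      rw [ih, List.append_assoc]
      rfl

theorem dfrom_filter (p : String → Bool) (l : List String) : ∀ acc,
    dfrom acc (l.filter p) = (dfrom acc l).filter p := by
  induction l with
  | nil => intro acc; simp [dfrom]
  | cons x xs ih =>
    intro acc
    by_cases hp : p x = true
    · by_cases h : x ∈ acc
      · have hc : acc.contains x = true := by simpa using h
        simp [dfrom, h, hc, hp, ih]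
      · have hc : acc.contains x = false := by simpa using h
        simp [dfrom, h, hc, hp, ih]
    · by_cases h : x ∈ acc
      · have hc : acc.contains x = true := by simpa using h
        simp [dfrom, h, hc, hp, ih]
      · have hc : acc.contains x = false := by simpa using h
        simp only [List.filter_cons, hp, Bool.false_eq_true, if_false, dfrom, hc]
        rw [← ih (acc ++ [x])]
        refine dfrom_agree _ _ _ ?_
        intro y hy
        have hyp : p y = true := List.of_mem_filter hy
        have hne : y ≠ x := fun hcc => by rw [hcc] at hyp; exact absurd hyp (by simp [hp])
        simp [List.mem_append, hne]

theorem pickLoop_eq (n : Int) (ts : List String) : ∀ (seen : PySem.Set String) (result : List String),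
    (∀ x, PySem.Set.contains seen x = result.contains x) → (result.length : Int) < n →
    pickLoop n ts seen result = (result ++ dfrom result ts).take n.toNat := by
  induction ts with
  | nil =>
    intro seen result _ hlt
    have h1 : result.length ≤ n.toNat := by omega
    simp only [pickLoop, dfrom, List.append_nil]
    exact (List.take_of_length_le h1).symm
  | cons t ts ih =>
    intro seen result hinv hlt
    have hst := hinv t
    by_cases h : result.contains t = true
    · have hs : PySem.Set.contains seen t = true := by rw [hst, h]
      have hsm : t ∈ seen := by simpa [PySem.Set.contains] using hs
      have hmem : t ∈ result := by simpa using h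
      have hdf : dfrom result (t :: ts) = dfrom result ts := by simp [dfrom, hmem]
      rw [show pickLoop n (t :: ts) seen result
            = (if (result.length : Int) ≥ n then result else pickLoop n ts seen result) from by
          simp [pickLoop, hsm]]
      rw [if_neg (by omega), ih seen result hinv hlt, hdf]
    · have hs : PySem.Set.contains seen t = false := by rw [hst]; simpa using h
      have hsm : t ∉ seen := by simpa [PySem.Set.contains] using hs
      have hmem : t ∉ result := by simpa using h
      have hdf : dfrom result (t :: ts) = t :: dfrom (result ++ [t]) ts := by simp [dfrom, hmem]
      rw [show pickLoop n (t :: ts) seen result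
            = (if ((result ++ [t]).length : Int) ≥ n then result ++ [t]
               else pickLoop n ts (PySem.Set.add seen t) (result ++ [t])) from by
          simp [pickLoop, hsm]]
      have hsplit : result ++ dfrom result (t :: ts) = (result ++ [t]) ++ dfrom (result ++ [t]) ts := by
        rw [hdf]; simp
      by_cases hge : ((result ++ [t]).length : Int) ≥ n
      · have hn : n.toNat = (result ++ [t]).length := by simp at hge ⊢; omega
        rw [if_pos hge, hsplit, hn, List.take_left]
      · rw [if_neg hge]
        have hadd : PySem.Set.add seen t = seen ++ [t] := by
          simp [PySem.Set.add, hsm]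
        have hinv' : ∀ x, PySem.Set.contains (seen ++ [t]) x = (result ++ [t]).contains x := by
          intro x
          simp only [PySem.Set.contains] at hinv ⊢
          rw [List.contains_append, List.contains_append, hinv x]
        have hlt' : (((result ++ [t]).length : Int)) < n := by simp at hge ⊢; omega
        rw [hadd, ih (seen ++ [t]) (result ++ [t]) hinv' hlt', hsplit]

-- ==== B-side machinery: first-occurrence rank key, stability of the insertion sort ====

-- the pure rank key: first index in popular_tags, or len(popular_tags) for absent tags
def keyI (pop : List String) (t : String) : Int :=
  match PySem.List.index? pop t with
  | some k => (k : Int)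
  | none => pop.length

theorem keyI_of_index?_some {pop : List String} {a : String} {k : Nat}
    (h : PySem.List.index? pop a = some k) : keyI pop a = k ∧ k < pop.length := by
  obtain ⟨hk, _, _⟩ := PySem.List.getElem_of_index?_eq_some h
  exact ⟨by simp only [keyI]; rw [h], hk⟩

theorem keyI_lt_of_mem {pop : List String} {a : String} (h : a ∈ pop) :
    keyI pop a < (pop.length : Int) := by
  have hs : (PySem.List.index? pop a).isSome = true := (PySem.List.index?_isSome_iff pop a).mpr h
  obtain ⟨k, hk⟩ := Option.isSome_iff_exists.mp hs
  obtain ⟨h1, h2⟩ := keyI_of_index?_some hk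
  rw [h1]; exact_mod_cast h2

theorem keyI_of_not_mem {pop : List String} {a : String} (h : a ∉ pop) :
    keyI pop a = (pop.length : Int) := by
  have hn : PySem.List.index? pop a = none := (PySem.List.index?_eq_none_iff pop a).mpr h
  simp only [keyI]; rw [hn]

-- the setdefault fold over enumerate builds exactly the first-index dict
theorem rankFold_get? (pop : List String) : ∀ (s : Int) (d : PySem.Dict String Int) (t : String),
    ((PySem.List.enumerate pop s).foldl (fun d p => d.setdefault p.2 p.1) d).get? t
      = ((d.get? t).or ((PySem.List.index? pop t).map (fun k => s + k))) := by
  induction pop with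
  | nil => intro s d t; simp [PySem.List.enumerate]
  | cons x xs ih =>
    intro s d t
    rw [PySem.List.enumerate_cons, List.foldl_cons]
    rw [ih (s + 1) (d.setdefault x s) t]
    by_cases hxt : t = x
    · subst hxt
      rw [PySem.Dict.get?_setdefault_self, PySem.List.index?_cons_self]
      cases hd : d.get? t with
      | none => simp
      | some v => simp
    · rw [PySem.Dict.get?_setdefault_of_ne d s hxt,
        PySem.List.index?_cons_of_ne xs (fun h => hxt h.symm)]
      cases hi : PySem.List.index? xs t with
      | none => simp
      | some k =>
        cases hd : d.get? t with
        | none => simp; omega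
        | some v => simp

-- B's dict key equals the pure key
theorem rank_getD_eq_keyI (pop : List String) (t : String) :
    (((PySem.List.enumerate pop).foldl (fun d p => d.setdefault p.2 p.1) PySem.Dict.empty).getD
        t (pop.length : Int)) = keyI pop t := by
  have h := rankFold_get? pop 0 PySem.Dict.empty t
  have he : (PySem.Dict.empty : PySem.Dict String Int).get? t = none := rfl
  rw [he] at h
  simp only [PySem.Dict.getD, h]
  cases hi : PySem.List.index? pop t with
  | none => simp only [keyI]; rw [hi]; rfl
  | some k => simp only [keyI]; rw [hi]; simp

-- dfrom with one more forbidden element is a filter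
theorem dfrom_shift (l : List String) : ∀ (acc : List String) (x : String), x ∉ acc →
    dfrom (acc ++ [x]) l = (dfrom acc l).filter (fun y => y != x) := by
  induction l with
  | nil => intro acc x _; simp [dfrom]
  | cons y l' ih =>
    intro acc x hx
    by_cases hy : y ∈ acc
    · have h1 : (acc ++ [x]).contains y = true := by simp [hy]
      have h2 : acc.contains y = true := by simpa using hy
      simp only [dfrom, h1, h2, if_pos]
      exact ih acc x hx
    · by_cases hyx : y = x
      · subst hyx
        have hL : dfrom (acc ++ [y]) (y :: l') = dfrom (acc ++ [y]) l' := by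
          have h1 : (acc ++ [y]).contains y = true := by simp
          simp only [dfrom, h1, if_pos]
        have hR : dfrom acc (y :: l') = y :: dfrom (acc ++ [y]) l' := by
          have h2 : acc.contains y = false := by simpa using hy
          simp only [dfrom, h2, Bool.false_eq_true, if_false]
        rw [hL, hR, List.filter_cons_of_neg (by simp)]
        refine (List.filter_eq_self.mpr ?_).symm
        intro z hz
        have hzm := ((mem_dfrom_iff l' (acc ++ [y]) z).mp hz).2
        have hzy : z ≠ y := fun h => hzm (h ▸ List.mem_append_right _ (List.mem_singleton.mpr rfl))
        simpa using hzy
      · have hL : dfrom (acc ++ [x]) (y :: l') = y :: dfrom (acc ++ [x] ++ [y]) l' := by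
          have h1 : (acc ++ [x]).contains y = false := by
            have hya : y ∉ acc := hy
            simp [hya, hyx]
          simp only [dfrom, h1, Bool.false_eq_true, if_false]
        have hR : dfrom acc (y :: l') = y :: dfrom (acc ++ [y]) l' := by
          have h2 : acc.contains y = false := by simpa using hy
          simp only [dfrom, h2, Bool.false_eq_true, if_false]
        rw [hL, hR, List.filter_cons_of_pos (by simpa using hyx)]
        refine congrArg (y :: ·) ?_
        rw [← ih (acc ++ [y]) x (by simp [hx, Ne.symm hyx]),
          dfrom_agree l' (acc ++ [x] ++ [y]) (acc ++ [y] ++ [x]) (by intro z _; simp; tauto)]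

-- relative order inside a dedup: strictly increasing first indices
def Rpop (pop : List String) (a b : String) : Prop :=
  ∃ i j : Nat, PySem.List.index? pop a = some i ∧ PySem.List.index? pop b = some j ∧ i < j

theorem dfrom_pairwise_Rpop : ∀ pop : List String, (dfrom [] pop).Pairwise (Rpop pop) := by
  intro pop
  induction pop with
  | nil => simp [dfrom]
  | cons x rest ih =>
    have h0 : dfrom [] (x :: rest) = x :: dfrom [x] rest := by simp [dfrom]
    have h1 := dfrom_shift rest [] x (by simp)
    simp only [List.nil_append] at h1
    rw [h0, h1]
    refine List.Pairwise.cons ?_ ?_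
    · intro b hb
      have hbx : b ≠ x := by simpa using (List.of_mem_filter hb)
      have hbr : b ∈ rest := ((mem_dfrom_iff rest [] b).mp (List.mem_of_mem_filter hb)).1
      obtain ⟨k, hk⟩ := Option.isSome_iff_exists.mp ((PySem.List.index?_isSome_iff rest b).mpr hbr)
      exact ⟨0, k + 1, PySem.List.index?_cons_self x rest,
        by rw [PySem.List.index?_cons_of_ne rest (fun h => hbx h.symm), hk]; rfl, by omega⟩
    · refine List.Pairwise.imp_of_mem ?_ (List.Pairwise.sublist (List.filter_sublist) ih)
      intro a b ha hb ⟨i, j, hia, hjb, hij⟩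
      have hax : a ≠ x := by simpa using (List.of_mem_filter ha)
      have hbx : b ≠ x := by simpa using (List.of_mem_filter hb)
      exact ⟨i + 1, j + 1,
        by rw [PySem.List.index?_cons_of_ne rest (fun h => hax h.symm), hia]; rfl,
        by rw [PySem.List.index?_cons_of_ne rest (fun h => hbx h.symm), hjb]; rfl, by omega⟩

-- stability of the insertion sort, as preservation of every key-class filter
theorem filter_insertBy (key : String → Int) (v : Int) (x : String) :
    ∀ acc : List String, acc.Pairwise (fun a b => key a ≤ key b) →
    (PySem.List.insertBy (fun a b => decide (key a < key b)) x acc).filter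
        (fun a => decide (key a = v))
      = acc.filter (fun a => decide (key a = v)) ++ (if key x = v then [x] else []) := by
  intro acc
  induction acc with
  | nil =>
    intro _
    simp only [PySem.List.insertBy, List.filter_nil, List.nil_append, List.filter]
    split_ifs with h <;> simp [h]
  | cons y ys ih =>
    intro hpw
    have hys : ys.Pairwise (fun a b => key a ≤ key b) := hpw.of_cons
    have hy : ∀ z ∈ ys, key y ≤ key z := fun z hz => List.rel_of_pairwise_cons hpw hz
    by_cases hb : key x < key y
    · rw [show PySem.List.insertBy (fun a b => decide (key a < key b)) x (y :: ys)
            = x :: y :: ys from by simp [PySem.List.insertBy, hb]]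
      by_cases hkv : key x = v
      · rw [List.filter_cons_of_pos (by simpa using hkv)]
        have hnil : (y :: ys).filter (fun a => decide (key a = v)) = [] := by
          refine List.filter_eq_nil_iff.mpr ?_
          intro z hz
          have : key y ≤ key z := by
            rcases List.mem_cons.mp hz with rfl | hz'
            · exact le_refl _
            · exact hy z hz'
          simp only [decide_eq_true_eq]
          omega
        rw [hnil, hkv, if_pos rfl]; simp
      · rw [List.filter_cons_of_neg (by simpa using hkv), if_neg hkv, List.append_nil]
    · rw [show PySem.List.insertBy (fun a b => decide (key a < key b)) x (y :: ys)
            = y :: PySem.List.insertBy (fun a b => decide (key a < key b)) x ys from by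
          simp [PySem.List.insertBy, hb]]
      by_cases hyv : key y = v
      · rw [List.filter_cons_of_pos (by simpa using hyv),
          List.filter_cons_of_pos (by simpa using hyv), ih hys, List.cons_append]
      · rw [List.filter_cons_of_neg (by simpa using hyv),
          List.filter_cons_of_neg (by simpa using hyv), ih hys]

theorem sorted_snoc (xs : List String) (x : String) (key : String → Int) :
    PySem.List.sorted (xs ++ [x]) key
      = PySem.List.insertBy (fun a b => decide (key a < key b)) x (PySem.List.sorted xs key) := by
  rw [PySem.List.sorted_eq_foldl_insertBy, PySem.List.sorted_eq_foldl_insertBy, List.foldl_append]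
  rfl

theorem sorted_filter_class (key : String → Int) (v : Int) : ∀ xs : List String,
    (PySem.List.sorted xs key).filter (fun a => decide (key a = v))
      = xs.filter (fun a => decide (key a = v)) := by
  intro xs
  induction xs using List.reverseRecOn with
  | nil => rfl
  | append_singleton xs x ih =>
    rw [sorted_snoc, filter_insertBy key v x _ (PySem.List.sorted_pairwise xs key), ih,
      List.filter_append]
    congr 1
    simp only [List.filter]
    split_ifs with h <;> simp_all

-- uniqueness: a permutation that is key-sorted and preserves every key class is THE stable sort result
theorem eq_of_perm_pairwise_filter (key : String → Int) : ∀ (l₁ l₂ : List String),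
    l₁.Perm l₂ → l₁.Pairwise (fun a b => key a ≤ key b) → l₂.Pairwise (fun a b => key a ≤ key b) →
    (∀ v, l₁.filter (fun a => decide (key a = v)) = l₂.filter (fun a => decide (key a = v))) →
    l₁ = l₂ := by
  intro l₁
  induction l₁ with
  | nil => intro l₂ hp _ _ _; exact (hp.symm.eq_nil).symm
  | cons a t₁ ih =>
    intro l₂ hp hpw₁ hpw₂ hf
    cases l₂ with
    | nil => exact absurd hp.symm.nil_eq (by simp)
    | cons b t₂ =>
      have hab : key a = key b := by
        have ha2 : a ∈ b :: t₂ := hp.mem_iff.mp (List.mem_cons_self ..)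
        have hb1 : b ∈ a :: t₁ := hp.symm.mem_iff.mp (List.mem_cons_self ..)
        have h1 : key a ≤ key b := by
          rcases List.mem_cons.mp hb1 with rfl | h
          · exact le_refl _
          · exact List.rel_of_pairwise_cons hpw₁ h
        have h2 : key b ≤ key a := by
          rcases List.mem_cons.mp ha2 with rfl | h
          · exact le_refl _
          · exact List.rel_of_pairwise_cons hpw₂ h
        omega
      have hfv := hf (key a)
      rw [List.filter_cons_of_pos (by simp), List.filter_cons_of_pos (by simp [hab])] at hfv
      have hhd : a = b := (List.cons.injEq _ _ _ _ ▸ hfv).1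
      subst hhd
      have htf : ∀ v, t₁.filter (fun x => decide (key x = v)) = t₂.filter (fun x => decide (key x = v)) := by
        intro v
        have := hf v
        by_cases hv : key a = v
        · rw [List.filter_cons_of_pos (by simpa using hv),
            List.filter_cons_of_pos (by simpa using hv)] at this
          exact (List.cons.injEq _ _ _ _ ▸ this).2
        · rwa [List.filter_cons_of_neg (by simpa using hv),
            List.filter_cons_of_neg (by simpa using hv)] at this
      exact congrArg (a :: ·) (ih t₂ hp.cons_inv hpw₁.of_cons hpw₂.of_cons htf)

-- a filter by a subsingleton predicate is determined by membership (on nodup lists)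
theorem filter_eq_singleton_of_sub (p : String → Bool)
    (hsub : ∀ a b, p a = true → p b = true → a = b) :
    ∀ (l : List String), l.Nodup → ∀ t, p t = true → t ∈ l → l.filter p = [t] := by
  intro l
  induction l with
  | nil => intro _ t _ ht; simp at ht
  | cons x l ih =>
    intro hnd t hpt htl
    have hxl : x ∉ l := (List.nodup_cons.mp hnd).1
    have hndl : l.Nodup := (List.nodup_cons.mp hnd).2
    rcases List.mem_cons.mp htl with rfl | htl'
    · rw [List.filter_cons_of_pos hpt]
      have : l.filter p = [] := by
        refine List.filter_eq_nil_iff.mpr ?_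
        intro z hz hpz
        exact hxl ((hsub z t hpz hpt) ▸ hz)
      rw [this]
    · have hpx : p x = false := by
        by_contra h
        have : p x = true := by simpa using h
        exact hxl ((hsub x t this hpt) ▸ htl')
      rw [List.filter_cons_of_neg (by simp [hpx])]
      exact ih hndl t hpt htl'

theorem filter_sub_eq (p : String → Bool) (hsub : ∀ a b, p a = true → p b = true → a = b)
    (l₁ l₂ : List String) (h₁ : l₁.Nodup) (h₂ : l₂.Nodup)
    (hmem : ∀ x, p x = true → (x ∈ l₁ ↔ x ∈ l₂)) : l₁.filter p = l₂.filter p := by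
  by_cases hex : ∃ t ∈ l₁, p t = true
  · obtain ⟨t, htl, hpt⟩ := hex
    rw [filter_eq_singleton_of_sub p hsub l₁ h₁ t hpt htl,
      filter_eq_singleton_of_sub p hsub l₂ h₂ t hpt ((hmem t hpt).mp htl)]
  · rw [List.filter_eq_nil_iff.mpr (fun z hz hpz => hex ⟨z, hz, hpz⟩),
      List.filter_eq_nil_iff.mpr (fun z hz hpz => hex ⟨z, (hmem z hpz).mpr hz, hpz⟩)]

theorem pairwise_le_of_const (key : String → Int) (c : Int) :
    ∀ l : List String, (∀ x ∈ l, key x = c) → l.Pairwise (fun a b => key a ≤ key b) := by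
  intro l
  induction l with
  | nil => intro _; exact List.Pairwise.nil
  | cons x xs ih =>
    intro h
    refine List.Pairwise.cons ?_ (ih (fun z hz => h z (List.mem_cons_of_mem _ hz)))
    intro b hb
    rw [h x (List.mem_cons_self ..), h b (List.mem_cons_of_mem _ hb)]

-- the heart of the B-side: the stable sort by first-popularity-rank IS "popular part ++ rest"
theorem sorted_keyI_eq (pop vt : List String) :
    PySem.List.sorted (PySem.List.dedup vt) (keyI pop)
      = PySem.List.dedup (pop.filter (fun t => vt.contains t))
        ++ (PySem.List.dedup vt).filter (fun t => !(pop.contains t)) := by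
  set left := PySem.List.dedup (pop.filter (fun t => vt.contains t)) with hleft
  set remaining := (PySem.List.dedup vt).filter (fun t => !(pop.contains t)) with hrem
  have hmem_left : ∀ x, x ∈ left ↔ x ∈ pop ∧ x ∈ vt := by
    intro x
    rw [hleft, PySem.List.mem_dedup, List.mem_filter]
    simp
  have hmem_rem : ∀ x, x ∈ remaining ↔ x ∈ vt ∧ x ∉ pop := by
    intro x
    rw [hrem, List.mem_filter, PySem.List.mem_dedup]
    simp
  have hnd_left : left.Nodup := PySem.List.nodup_dedup _
  have hnd_rem : remaining.Nodup := (PySem.List.nodup_dedup vt).filter _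
  have hnd_target : (left ++ remaining).Nodup := by
    rw [List.nodup_append]
    refine ⟨hnd_left, hnd_rem, ?_⟩
    intro x hx b hb hxb
    exact ((hmem_rem b).mp hb).2 (hxb ▸ ((hmem_left x).mp hx).1)
  have hperm : (left ++ remaining).Perm (PySem.List.dedup vt) := by
    rw [List.perm_ext_iff_of_nodup hnd_target (PySem.List.nodup_dedup vt)]
    intro x
    rw [List.mem_append, hmem_left, hmem_rem, PySem.List.mem_dedup]
    by_cases hxp : x ∈ pop <;> by_cases hxv : x ∈ vt <;> simp [hxp, hxv]
  have hleft_pw : left.Pairwise (Rpop pop) := by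
    rw [hleft, dedup_eq_dfrom, dfrom_filter, ← dedup_eq_dfrom]
    exact List.Pairwise.sublist (List.filter_sublist) (dedup_eq_dfrom pop ▸ dfrom_pairwise_Rpop pop)
  have hpw_target : (left ++ remaining).Pairwise (fun a b => keyI pop a ≤ keyI pop b) := by
    rw [List.pairwise_append]
    refine ⟨?_, ?_, ?_⟩
    · refine hleft_pw.imp ?_
      intro a b ⟨i, j, hia, hjb, hij⟩
      rw [(keyI_of_index?_some hia).1, (keyI_of_index?_some hjb).1]
      exact_mod_cast Nat.le_of_lt hij
    · refine pairwise_le_of_const (keyI pop) (pop.length : Int) remaining ?_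
      intro x hx
      exact keyI_of_not_mem ((hmem_rem x).mp hx).2
    · intro a ha b hb
      have h1 : keyI pop a < (pop.length : Int) := keyI_lt_of_mem ((hmem_left a).mp ha).1
      have h2 : keyI pop b = (pop.length : Int) := keyI_of_not_mem ((hmem_rem b).mp hb).2
      omega
  have hfilt : ∀ v, (PySem.List.dedup vt).filter (fun a => decide (keyI pop a = v))
      = (left ++ remaining).filter (fun a => decide (keyI pop a = v)) := by
    intro v
    rw [List.filter_append]
    by_cases hv : v = (pop.length : Int)
    · subst hv
      have h1 : left.filter (fun a => decide (keyI pop a = (pop.length : Int))) = [] := by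
        refine List.filter_eq_nil_iff.mpr ?_
        intro z hz hpz
        have := keyI_lt_of_mem ((hmem_left z).mp hz).1
        simp only [decide_eq_true_eq] at hpz
        omega
      have h2 : remaining.filter (fun a => decide (keyI pop a = (pop.length : Int))) = remaining := by
        refine List.filter_eq_self.mpr ?_
        intro z hz
        simp [keyI_of_not_mem ((hmem_rem z).mp hz).2]
      rw [h1, h2, List.nil_append, hrem]
      refine List.filter_congr ?_
      intro a _
      by_cases hap : a ∈ pop
      · have := keyI_lt_of_mem hap
        have hc : pop.contains a = true := by simpa using hap
        simp only [hc, Bool.not_true, decide_eq_false_iff_not]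
        omega
      · have := keyI_of_not_mem hap
        simp [this, hap]
    · have h2 : remaining.filter (fun a => decide (keyI pop a = v)) = [] := by
        refine List.filter_eq_nil_iff.mpr ?_
        intro z hz hpz
        have := keyI_of_not_mem ((hmem_rem z).mp hz).2
        simp only [decide_eq_true_eq] at hpz
        exact hv (by omega)
      rw [h2, List.append_nil]
      refine filter_sub_eq _ ?_ _ _ (PySem.List.nodup_dedup vt) hnd_left ?_
      · intro a b hpa hpb
        simp only [decide_eq_true_eq] at hpa hpb
        cases hia : PySem.List.index? pop a with
        | none =>
          rw [keyI_of_not_mem ((PySem.List.index?_eq_none_iff pop a).mp hia)] at hpa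
          exact absurd hpa.symm hv
        | some ka =>
          cases hib : PySem.List.index? pop b with
          | none =>
            rw [keyI_of_not_mem ((PySem.List.index?_eq_none_iff pop b).mp hib)] at hpb
            exact absurd hpb.symm hv
          | some kb =>
            have h1 := (keyI_of_index?_some hia).1
            have h2 := (keyI_of_index?_some hib).1
            have hk : ka = kb := by rw [h1] at hpa; rw [h2] at hpb; omega
            obtain ⟨hka, hga, -⟩ := PySem.List.getElem_of_index?_eq_some hia
            obtain ⟨hkb, hgb, -⟩ := PySem.List.getElem_of_index?_eq_some hib
            subst hk
            rw [← hga, ← hgb]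
      · intro x hpx
        simp only [decide_eq_true_eq] at hpx
        have hxp : x ∈ pop := by
          by_contra hc
          exact hv ((keyI_of_not_mem hc) ▸ hpx.symm)
        rw [PySem.List.mem_dedup, hmem_left x]
        simp [hxp]
  exact eq_of_perm_pairwise_filter (keyI pop) _ _
    (((PySem.List.sorted_perm _ _ _).trans hperm.symm))
    (PySem.List.sorted_pairwise _ _) hpw_target
    (fun v => by rw [sorted_filter_class (keyI pop) v (PySem.List.dedup vt), ← hfilt v])

theorem pick_event_types_spec : Claim_unchanged_pick_event_types := by
  intro venue popular_tags n _
  intro hnd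
  unfold pick_event_types pick_event_types_alt
  simp only []
  set vt := ((PySem.Dict.mk venue).get? "event_types").getD [] with hvt
  by_cases hv : vt = []
  · simp [hv]
  · have hn : ¬ n ≤ 0 := fun hc => hnd ⟨hv, hc⟩
    rw [if_neg hv, if_neg (by simp [hv, hn])]
    set overlapping := popular_tags.filter (fun t => vt.contains t) with hov
    set rest := vt.filter (fun t => !(overlapping.contains t)) with hrest
    rw [pickLoop_eq n (overlapping ++ rest) PySem.Set.empty []
        (by intro x; rfl) (by simp; omega)]
    simp only [List.nil_append]
    rw [show dfrom ([] : List String) (overlapping ++ rest)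
          = dfrom [] overlapping ++ dfrom ([] ++ dfrom [] overlapping) rest from
        dfrom_append overlapping rest []]
    rw [dfrom_agree rest ([] ++ dfrom [] overlapping) [] (by
      intro y hy
      have h2 : y ∉ overlapping := by
        have := (List.mem_filter.mp (hrest ▸ hy)).2
        simpa using this
      simp only [List.nil_append, List.mem_nil_iff, iff_false]
      intro hc
      exact h2 ((mem_dfrom_iff overlapping [] y).mp hc).1)]
    have hrest2 : rest = vt.filter (fun t => !(popular_tags.contains t)) := by
      rw [hrest]
      refine List.filter_congr ?_
      intro t ht
      have : overlapping.contains t = popular_tags.contains t := by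
        by_cases hp : t ∈ popular_tags
        · simp [hov, List.mem_filter, hp, ht]
        · simp [hov, List.mem_filter, hp]
      rw [this]
    have hkey : (fun t => (((PySem.List.enumerate popular_tags).foldl
            (fun d p => d.setdefault p.2 p.1) PySem.Dict.empty).getD t
            ((popular_tags.length : Int))))
        = keyI popular_tags := funext (rank_getD_eq_keyI popular_tags)
    rw [PySem.List.slice_to _ (by omega), hkey, sorted_keyI_eq popular_tags vt, hrest2,
      show dfrom ([] : List String) (List.filter (fun t => !popular_tags.contains t) vt)
          = (dfrom [] vt).filter (fun t => !popular_tags.contains t) from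
        dfrom_filter _ vt [],
      ← dedup_eq_dfrom, ← dedup_eq_dfrom]

theorem pick_event_types_changed : Claim_changed_pick_event_types := by
  unfold Claim_changed_pick_event_types; decide

theorem pick_event_types_tight : Claim_exact_pick_event_types := by
  intro venue popular_tags n _ hd
  obtain ⟨hv, hn⟩ := hd
  unfold pick_event_types pick_event_types_alt
  simp only []
  set vt := ((PySem.Dict.mk venue).get? "event_types").getD [] with hvt
  have hv' : vt ≠ [] := hv
  rw [if_neg hv', if_pos (Or.inr hn)]
  set overlapping := popular_tags.filter (fun t => vt.contains t) with hov
  set rest := vt.filter (fun t => !(overlapping.contains t)) with hrest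
  have hne : overlapping ++ rest ≠ [] := by
    intro hc
    obtain ⟨ho, hr⟩ := List.append_eq_nil_iff.mp hc
    rw [hrest, ho] at hr
    simp at hr
    exact hv' hr
  obtain ⟨t, ts, hts⟩ := List.exists_cons_of_ne_nil hne
  rw [hts]
  have : pickLoop n (t :: ts) PySem.Set.empty [] = [t] := by
    have hc : (PySem.Set.empty : PySem.Set String).contains t = false := rfl
    simp only [pickLoop, hc, Bool.not_false, if_pos]
    rw [if_pos (by simp; omega)]
    simp
  rw [this]
  simp

-- ===== VERDICT (by name: the statement is the Claim_ definition above) =====
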